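-- pv_equiv track=rewrite | github.com/smeylan/wavChecks | wavChecks.py | trim_wav
-- ===== SOURCE A (Python) =====
-- import copy
--
-- def trim_wav(data_all, THRESHOLD, TRIM_APPEND):
--     _from = 0
--     _to = len(data_all) - 1
--     for i, b in enumerate(data_all):
--         if abs(b) > THRESHOLD:
--             _from = max(0, i - TRIM_APPEND)
--             break
--     for i, b in enumerate(reversed(data_all)):
--         if abs(b) > THRESHOLD:
--             _to = min(len(data_all) - 1, len(data_all) - 1 - i + TRIM_APPEND)
--             break
--     return copy.deepcopy(data_all[_from:(_to + 1)])
-- ===== SOURCE B (Python) =====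
-- import copy
--
-- def trim_wav(data_all, THRESHOLD, TRIM_APPEND):
--     # One pass: collect the indices of all above-threshold samples, then
--     # derive both trim endpoints from the first and last such index.
--     idx = [i for i, b in enumerate(data_all) if abs(b) > THRESHOLD]
--     if idx:
--         _from = max(0, idx[0] - TRIM_APPEND)
--         _to = min(len(data_all) - 1, idx[-1] + TRIM_APPEND)
--     else:
--         _from = 0
--         _to = len(data_all) - 1
--     return copy.deepcopy(data_all[_from:(_to + 1)])
-- ===== Notes on version B (the rewrite author's own statement) =====
-- stated objective: simpler
-- what changed: Replaces the two directional early-break scans (forward, and over reversed(data_all)) by a single index-gathering pass whose first and last elements give both endpoints via max/min.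
import Mathlib
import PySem

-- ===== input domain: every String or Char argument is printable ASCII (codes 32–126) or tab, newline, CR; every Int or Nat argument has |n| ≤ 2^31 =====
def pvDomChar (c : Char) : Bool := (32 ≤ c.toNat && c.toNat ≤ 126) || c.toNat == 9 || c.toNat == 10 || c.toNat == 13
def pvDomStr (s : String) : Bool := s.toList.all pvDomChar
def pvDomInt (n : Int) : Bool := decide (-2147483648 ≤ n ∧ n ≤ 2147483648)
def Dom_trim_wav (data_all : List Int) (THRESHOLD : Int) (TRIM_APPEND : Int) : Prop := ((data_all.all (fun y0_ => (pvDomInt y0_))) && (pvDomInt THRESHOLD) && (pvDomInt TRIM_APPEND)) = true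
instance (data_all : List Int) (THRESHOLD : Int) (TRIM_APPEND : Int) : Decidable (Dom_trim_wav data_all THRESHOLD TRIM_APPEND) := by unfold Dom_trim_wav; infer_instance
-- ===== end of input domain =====

-- B replaces A's two directional early-break scans by one index-gathering pass
-- plus a max/min endpoint derivation (objective: simpler).

-- ===== PORT A =====
-- first loop of A: first i with |b| > THRESHOLD sets _from = max 0 (i - TRIM_APPEND); break
def trimFromLoop (l : List (Int × Int)) (THRESHOLD TRIM_APPEND : Int) : Int :=
  match l with
  | [] => 0
  | (i, b) :: rest =>
    if |b| > THRESHOLD then max 0 (i - TRIM_APPEND)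
    else trimFromLoop rest THRESHOLD TRIM_APPEND

-- second loop of A, over enumerate(reversed(data_all)); n = len(data_all)
def trimToLoop (l : List (Int × Int)) (n THRESHOLD TRIM_APPEND : Int) : Int :=
  match l with
  | [] => n - 1
  | (i, b) :: rest =>
    if |b| > THRESHOLD then min (n - 1) (n - 1 - i + TRIM_APPEND)
    else trimToLoop rest n THRESHOLD TRIM_APPEND

def trim_wav (data_all : List Int) (THRESHOLD : Int) (TRIM_APPEND : Int) : List Int :=
  let _from := trimFromLoop (PySem.List.enumerate data_all 0) THRESHOLD TRIM_APPEND
  let _to := trimToLoop (PySem.List.enumerate data_all.reverse 0) (data_all.length : Int) THRESHOLD TRIM_APPEND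
  PySem.List.slice data_all (some _from) (some (_to + 1))

-- ===== PORT B =====
def trim_wav_alt (data_all : List Int) (THRESHOLD : Int) (TRIM_APPEND : Int) : List Int :=
  let idx := ((PySem.List.enumerate data_all 0).filter (fun q => |q.2| > THRESHOLD)).map Prod.fst
  let n : Int := (data_all.length : Int)
  let _from := match idx with
    | [] => (0 : Int)
    | i :: _ => max 0 (i - TRIM_APPEND)
  let _to := match idx.getLast? with
    | none => n - 1
    | some j => min (n - 1) (j + TRIM_APPEND)
  PySem.List.slice data_all (some _from) (some (_to + 1))

-- ===== PRECONDITION & SPEC =====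
def Spec_trim_wav (data_all : List Int) (THRESHOLD : Int) (TRIM_APPEND : Int) (out : List Int) : Prop := out = trim_wav_alt data_all THRESHOLD TRIM_APPEND
instance (data_all : List Int) (THRESHOLD : Int) (TRIM_APPEND : Int) (out : List Int) : Decidable (Spec_trim_wav data_all THRESHOLD TRIM_APPEND out) := by unfold Spec_trim_wav; infer_instance

-- ===== CLAIM (what is proved, stated in full; the proofs are below) =====
def Claim_equal_trim_wav : Prop := ∀ (data_all : List Int) (THRESHOLD : Int) (TRIM_APPEND : Int), Dom_trim_wav data_all THRESHOLD TRIM_APPEND → Spec_trim_wav data_all THRESHOLD TRIM_APPEND (trim_wav data_all THRESHOLD TRIM_APPEND)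

-- ===== LEMMAS AND PROOFS =====

-- enumerate with shifted start
theorem enum_shift (l : List Int) (s : Int) :
    PySem.List.enumerate l (s + 1) = (PySem.List.enumerate l s).map (fun q => (q.1 + 1, q.2)) := by
  induction l generalizing s with
  | nil => simp [PySem.List.enumerate_nil]
  | cons x t ih => simp [PySem.List.enumerate_cons, ih (s + 1)]

theorem enum_reverse (l : List Int) (s : Int) :
    PySem.List.enumerate l.reverse s =
      ((PySem.List.enumerate l s).map
        (fun q => (2 * s + (l.length : Int) - 1 - q.1, q.2))).reverse := by
  induction l generalizing s with
  | nil => simp [PySem.List.enumerate_nil]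
  | cons x t ih =>
    have h1 : (x :: t).reverse = t.reverse ++ [x] := by simp
    rw [h1]
    have happ : ∀ (xs ys : List Int) (a : Int),
        PySem.List.enumerate (xs ++ ys) a =
          PySem.List.enumerate xs a ++ PySem.List.enumerate ys (a + xs.length) := by
      intro xs
      induction xs with
      | nil => intro ys a; simp [PySem.List.enumerate_nil]
      | cons z zs ihz =>
        intro ys a
        simp [PySem.List.enumerate_cons, ihz]
        ring_nf
    rw [happ, ih s, PySem.List.enumerate_cons]
    simp [PySem.List.enumerate_cons, PySem.List.enumerate_nil]
    constructor
    · rw [enum_shift, List.map_map]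
      apply List.map_congr_left
      intro q _
      simp only [Function.comp]
      have : 2 * s + (↑t.length : Int) - 1 - q.1 = 2 * s + ((↑t.length : Int) + 1) - 1 - (q.1 + 1) := by ring
      rw [this]
    · ring

-- forward scan = head of the filtered index list
theorem trimFromLoop_eq (l : List (Int × Int)) (T TA : Int) :
    trimFromLoop l T TA =
      (match (l.filter (fun q => |q.2| > T)).map Prod.fst with
       | [] => (0 : Int)
       | i :: _ => max 0 (i - TA)) := by
  induction l with
  | nil => simp [trimFromLoop]
  | cons q t ih =>
    obtain ⟨i, b⟩ := q
    by_cases h : |b| > T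
    · simp [trimFromLoop, h]
    · simp [trimFromLoop, h, ih]

-- backward scan over the mapped-reversed enumeration = last of the filtered index list
theorem trimToLoop_rev (m : List (Int × Int)) (c n T TA : Int) :
    trimToLoop ((m.map (fun q => (c - q.1, q.2))).reverse) n T TA =
      (match ((m.filter (fun q => |q.2| > T)).map Prod.fst).getLast? with
       | none => n - 1
       | some j => min (n - 1) (n - 1 - (c - j) + TA)) := by
  induction m using List.reverseRecOn with
  | nil => simp [trimToLoop]
  | append_singleton t q ih =>
    obtain ⟨i, b⟩ := q
    by_cases h : |b| > T
    · simp [trimToLoop, h, List.filter_append]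
    · simp [trimToLoop, h, List.filter_append, ih]

-- ===== VERDICT (by name: the statement is the Claim_ definition above) =====
theorem trim_wav_spec : Claim_equal_trim_wav := by
  intro d T TA _
  unfold Spec_trim_wav trim_wav trim_wav_alt
  rw [trimFromLoop_eq, enum_reverse d 0, trimToLoop_rev]
  have hc : (2 * (0:Int) + (d.length : Int) - 1) = (d.length : Int) - 1 := by ring
  rw [hc]
  rcases hl : ((PySem.List.enumerate d 0).filter (fun q => |q.2| > T)).map Prod.fst with _ | ⟨i, rest⟩
  · simp [hl]
  · rcases hlast : (i :: rest).getLast? with _ | j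
    · simp at hlast
    · simp only [hl, hlast]
      have : ((d.length : Int) - 1 - ((d.length : Int) - 1 - j) + TA) = j + TA := by ring
      rw [this]
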